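-- pv_equiv track=rewrite | github.com/manuelsolan-o/Rebalancing-Bike-Sharing-System-Dashboard | app.py | bikes_per_station
-- ===== SOURCE A (Python) =====
-- def bikes_per_station(demanda):
--     bikes = 0
--     flow = 0
--
--     for d in demanda:
--         flow += d
--
--         if flow < 0:
--             bikes += abs(flow)
--             flow = 0
--
--     return bikes
-- ===== SOURCE B (Python) =====
-- def bikes_per_station(demanda):
--     # Stage 1: build the list of true (never-reset) prefix sums.
--     sums = []
--     total = 0
--     for d in demanda:
--         total += d
--         sums.append(total)
--     # Stage 2: the answer is how far below zero the prefix sums ever dip.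
--     if not sums:
--         return 0
--     return max(0, -min(sums))
-- ===== Notes on version B (the rewrite author's own statement) =====
-- stated objective: simpler
-- what changed: B works in two staged passes: it first materialises the list of true (never-reset) prefix sums, then returns max(0, -min(prefix sums)), instead of A's single pass with a clamped flow and an if-branch accumulating deficits.
import Mathlib
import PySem

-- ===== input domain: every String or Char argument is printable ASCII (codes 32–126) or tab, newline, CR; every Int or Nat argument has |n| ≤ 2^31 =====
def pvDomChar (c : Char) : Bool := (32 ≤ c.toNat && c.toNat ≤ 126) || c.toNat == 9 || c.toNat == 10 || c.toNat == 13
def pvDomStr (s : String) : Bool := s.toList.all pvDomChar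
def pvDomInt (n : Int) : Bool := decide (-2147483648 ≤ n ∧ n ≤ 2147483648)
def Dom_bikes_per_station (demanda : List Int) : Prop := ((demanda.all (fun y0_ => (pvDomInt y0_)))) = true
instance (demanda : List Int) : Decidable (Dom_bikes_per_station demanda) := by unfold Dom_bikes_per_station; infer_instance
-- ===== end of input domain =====

-- B replaces A's clamped-flow single pass by two staged passes (prefix-sum list, then its minimum); simpler, same cost.

-- ===== PORT A =====
-- A: clamped running flow; each time flow dips below 0, add |flow| to bikes and reset flow.
def bikes_per_station (demanda : List Int) : Int :=
  (demanda.foldl (fun (st : Int × Int) d =>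
      let flow := st.2 + d
      if flow < 0 then (st.1 + |flow|, 0) else (st.1, flow)) (0, 0)).1

-- ===== PORT B =====
-- B stage 1: the list of true (never-reset) prefix sums, built with a running total.
def pvPrefixSums : List Int → Int → List Int
  | [], _ => []
  | d :: t, total => (total + d) :: pvPrefixSums t (total + d)

-- B stage 2: if no prefix sums, 0; else max(0, -min(sums)). Python's min on a nonempty list = foldl min over its head.
def bikes_per_station_alt (demanda : List Int) : Int :=
  match pvPrefixSums demanda 0 with
  | [] => 0
  | x :: t => max 0 (-(t.foldl min x))

-- ===== PRECONDITION & SPEC =====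
def Spec_bikes_per_station (demanda : List Int) (out : Int) : Prop := out = bikes_per_station_alt demanda
instance (demanda : List Int) (out : Int) : Decidable (Spec_bikes_per_station demanda out) := by unfold Spec_bikes_per_station; infer_instance

-- ===== CLAIM (what is proved, stated in full; the proofs are below) =====
def Claim_equal_bikes_per_station : Prop := ∀ (demanda : List Int), Dom_bikes_per_station demanda → Spec_bikes_per_station demanda (bikes_per_station demanda)

-- ===== LEMMAS AND PROOFS =====

-- Pull a min into the seed of a foldl min.
theorem foldl_min_min : ∀ (l : List Int) (a b : Int),
    l.foldl min (min a b) = min a (l.foldl min b) := by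
  intro l
  induction l with
  | nil => intro a b; rfl
  | cons x t ih =>
    intro a b
    simp only [List.foldl_cons, min_assoc]
    exact ih a (min b x)

-- Invariant: A's fold from (-m, s - m) (m ≤ s) returns -(min of m and all prefix sums from s).
theorem bikes_fold_pref : ∀ (l : List Int) (s m : Int), m ≤ s →
    (l.foldl (fun (st : Int × Int) d =>
      let flow := st.2 + d
      if flow < 0 then (st.1 + |flow|, 0) else (st.1, flow)) (-m, s - m)).1
    = -((pvPrefixSums l s).foldl min m) := by
  intro l
  induction l with
  | nil => intro s m h; simp [pvPrefixSums]
  | cons d t ih =>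
    intro s m h
    simp only [List.foldl_cons, pvPrefixSums]
    split_ifs with hc
    · have habs : -m + |s - m + d| = -(s + d) := by rw [abs_of_neg hc]; ring
      have hmin : min m (s + d) = s + d := by omega
      rw [hmin, habs]
      simpa using ih (s + d) (s + d) le_rfl
    · have hmin : min m (s + d) = m := by omega
      rw [hmin, show s - m + d = (s + d) - m by ring]
      exact ih (s + d) m (by omega)

-- ===== VERDICT (by name: the statement is the Claim_ definition above) =====
theorem bikes_per_station_spec : Claim_equal_bikes_per_station := by
  intro demanda _
  unfold Spec_bikes_per_station bikes_per_station bikes_per_station_alt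
  rw [show ((0 : Int), (0 : Int)) = (-(0 : Int), (0 : Int) - 0) by norm_num,
    bikes_fold_pref demanda 0 0 le_rfl]
  cases h : pvPrefixSums demanda 0 with
  | nil => simp
  | cons x t =>
    simp only [List.foldl_cons]
    rw [show min (0 : Int) x = min 0 x from rfl, foldl_min_min t 0 x]
    omega
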